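-- pv_equiv track=rewrite | github.com/Davio27/API-RAD | application/QuotationApp.py | have_all_type
-- ===== SOURCE A (Python) =====
-- def have_all_type(quotation):
--     hasCompra = False
--     hasVenda = False
--     hasMaximo = False
--     hasMinimo = False
--
--     for c in quotation:
--         if c[3] == 'COMPRA':
--             hasCompra = True
--         elif c[3] == 'VENDA':
--             hasVenda = True
--         elif c[3] == 'MAXIMO':
--             hasMaximo = True
--         elif c[3] == 'MINIMO':
--             hasMinimo = True
--
--     return hasCompra and hasVenda and hasMinimo and hasMaximo
-- ===== SOURCE B (Python) =====
-- def have_all_type(quotation):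
--     # One separate scan per required type code: no accumulated state at all.
--     return all(any(c[3] == t for c in quotation)
--                for t in ('COMPRA', 'VENDA', 'MAXIMO', 'MINIMO'))
-- ===== Notes on version B (the rewrite author's own statement) =====
-- stated objective: simpler
-- what changed: Replaces the single stateful pass with four boolean flags and an if/elif chain by four independent staged scans, one existence test per required type code, combined with all().
import Mathlib
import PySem

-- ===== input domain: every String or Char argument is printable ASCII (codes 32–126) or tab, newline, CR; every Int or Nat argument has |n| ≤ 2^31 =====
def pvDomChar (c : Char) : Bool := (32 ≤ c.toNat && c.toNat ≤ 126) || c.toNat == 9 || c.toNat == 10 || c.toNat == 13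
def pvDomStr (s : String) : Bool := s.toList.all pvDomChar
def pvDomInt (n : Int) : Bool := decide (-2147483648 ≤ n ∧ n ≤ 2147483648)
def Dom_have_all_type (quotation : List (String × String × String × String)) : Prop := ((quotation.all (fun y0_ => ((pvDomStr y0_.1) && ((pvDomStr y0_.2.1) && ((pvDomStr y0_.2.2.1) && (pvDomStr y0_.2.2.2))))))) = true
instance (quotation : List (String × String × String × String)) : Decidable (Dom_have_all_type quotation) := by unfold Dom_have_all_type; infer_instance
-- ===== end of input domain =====

-- B replaces A's single stateful pass (four boolean flags, if/elif chain) by four independent existence scans, one per required type code (simpler).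


-- ===== PORT A =====
-- Faithful port of A: one pass maintaining four boolean flags via an if/elif chain.
def have_all_type (quotation : List (String × String × String × String)) : Bool :=
  let st := quotation.foldl
    (fun (st : Bool × Bool × Bool × Bool) c =>
      if c.2.2.2 == "COMPRA" then (true, st.2.1, st.2.2.1, st.2.2.2)
      else if c.2.2.2 == "VENDA" then (st.1, true, st.2.2.1, st.2.2.2)
      else if c.2.2.2 == "MAXIMO" then (st.1, st.2.1, true, st.2.2.2)
      else if c.2.2.2 == "MINIMO" then (st.1, st.2.1, st.2.2.1, true)
      else st)
    (false, false, false, false)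
  -- return hasCompra and hasVenda and hasMinimo and hasMaximo
  st.1 && st.2.1 && st.2.2.2 && st.2.2.1

-- ===== PORT B =====
-- Port of B: all(any(c[3] == t for c in quotation) for t in the four codes) — four staged scans.
def have_all_type_alt (quotation : List (String × String × String × String)) : Bool :=
  ["COMPRA", "VENDA", "MAXIMO", "MINIMO"].all
    (fun t => quotation.any (fun c => c.2.2.2 == t))

-- ===== PRECONDITION & SPEC =====
def Spec_have_all_type (quotation : List (String × String × String × String)) (out : Bool) : Prop := out = have_all_type_alt quotation
instance (quotation : List (String × String × String × String)) (out : Bool) : Decidable (Spec_have_all_type quotation out) := by unfold Spec_have_all_type; infer_instance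

-- ===== CLAIM (what is proved, stated in full; the proofs are below) =====
def Claim_equal_have_all_type : Prop := ∀ (quotation : List (String × String × String × String)), Dom_have_all_type quotation → Spec_have_all_type quotation (have_all_type quotation)

-- ===== LEMMAS AND PROOFS =====
-- A's loop body, named for the invariant lemma below (identical to the lambda in have_all_type).
def pvStepA : (Bool × Bool × Bool × Bool) → (String × String × String × String) → (Bool × Bool × Bool × Bool) :=
  fun st c =>
    if c.2.2.2 == "COMPRA" then (true, st.2.1, st.2.2.1, st.2.2.2)
    else if c.2.2.2 == "VENDA" then (st.1, true, st.2.2.1, st.2.2.2)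
    else if c.2.2.2 == "MAXIMO" then (st.1, st.2.1, true, st.2.2.2)
    else if c.2.2.2 == "MINIMO" then (st.1, st.2.1, st.2.2.1, true)
    else st

-- Invariant of A's loop: each flag records whether its code has been seen (or was already set).
theorem pvFoldlFlags (q : List (String × String × String × String)) (st : Bool × Bool × Bool × Bool) :
    q.foldl pvStepA st = (st.1 || q.any (fun c => c.2.2.2 == "COMPRA"),
                    st.2.1 || q.any (fun c => c.2.2.2 == "VENDA"),
                    st.2.2.1 || q.any (fun c => c.2.2.2 == "MAXIMO"),
                    st.2.2.2 || q.any (fun c => c.2.2.2 == "MINIMO")) := by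
  induction q generalizing st with
  | nil => simp
  | cons c q ih =>
    simp only [List.foldl_cons, List.any_cons, ih]
    unfold pvStepA
    obtain ⟨a, b, m, n⟩ := st
    by_cases h1 : c.2.2.2 == "COMPRA" <;> by_cases h2 : c.2.2.2 == "VENDA" <;>
      by_cases h3 : c.2.2.2 == "MAXIMO" <;> by_cases h4 : c.2.2.2 == "MINIMO" <;>
      simp_all [beq_iff_eq] <;>
      simp [beq_eq_false_iff_ne.mpr ‹¬c.2.2.2 = "COMPRA"›,
            beq_eq_false_iff_ne.mpr ‹¬c.2.2.2 = "VENDA"›,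
            beq_eq_false_iff_ne.mpr ‹¬c.2.2.2 = "MAXIMO"›,
            beq_eq_false_iff_ne.mpr ‹¬c.2.2.2 = "MINIMO"›]

-- ===== VERDICT (by name: the statement is the Claim_ definition above) =====
theorem have_all_type_spec : Claim_equal_have_all_type := by
  intro q _
  unfold Spec_have_all_type have_all_type have_all_type_alt
  rw [show (fun (st : Bool × Bool × Bool × Bool) (c : String × String × String × String) =>
      if c.2.2.2 == "COMPRA" then (true, st.2.1, st.2.2.1, st.2.2.2)
      else if c.2.2.2 == "VENDA" then (st.1, true, st.2.2.1, st.2.2.2)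
      else if c.2.2.2 == "MAXIMO" then (st.1, st.2.1, true, st.2.2.2)
      else if c.2.2.2 == "MINIMO" then (st.1, st.2.1, st.2.2.1, true)
      else st) = pvStepA from rfl, pvFoldlFlags]
  simp [List.all_cons]
  rw [Bool.eq_iff_iff]
  simp
  tauto
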